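-- pv_equiv track=rewrite | github.com/ark2016/VK-Technopark-project-2024 | data_mining/tests/functions/file_421_440.py | pop_unique_elements
-- ===== SOURCE A (Python) =====
-- def pop_unique_elements(stack):
--     result = []
--     element_count = {}
--     while stack:
--         elem = stack.pop()
--         element_count[elem] = element_count.get(elem, 0) + 1
--
--     for elem in element_count:
--         if element_count[elem] == 1:
--             result.append(elem)
--     if not result:
--         return None
--     return result
-- ===== SOURCE B (Python) =====
-- def pop_unique_elements(stack):
--     popped = stack[::-1]
--     stack.clear()
--     seen = set()
--     duplicates = set()
--     for e in popped:
--         if e in seen: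
--             duplicates.add(e)
--         else:
--             seen.add(e)
--     result = [e for e in popped if e not in duplicates]
--     if not result:
--         return None
--     return result
-- ===== Notes on version B (the rewrite author's own statement) =====
-- stated objective: alternative
-- what changed: Replaces the occurrence-count dictionary and the second loop over dict keys by a single pass maintaining seen/duplicates sets followed by a filter of the popped list; both drain the stack and return None when no element is unique.
import Mathlib
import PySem

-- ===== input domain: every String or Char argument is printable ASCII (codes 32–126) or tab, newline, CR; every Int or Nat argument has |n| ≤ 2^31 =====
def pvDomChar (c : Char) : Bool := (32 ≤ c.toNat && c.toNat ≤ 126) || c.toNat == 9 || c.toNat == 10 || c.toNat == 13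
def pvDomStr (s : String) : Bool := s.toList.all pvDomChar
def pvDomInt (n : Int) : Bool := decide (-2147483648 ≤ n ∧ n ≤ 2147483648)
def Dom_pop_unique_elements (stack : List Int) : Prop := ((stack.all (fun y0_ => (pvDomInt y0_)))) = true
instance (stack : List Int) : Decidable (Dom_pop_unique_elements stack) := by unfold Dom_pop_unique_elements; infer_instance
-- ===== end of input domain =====

-- B replaces the occurrence-count dictionary and key iteration by one pass with seen/duplicates
-- sets plus a filter of the popped list (objective: alternative). Both Pythons drain `stack` in
-- place (A by pop, B by clear); the equivalence proved here is about the RETURN value.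

-- ===== PORT A =====
def pop_unique_elements (stack : List Int) : Option (List Int) :=
  -- while stack: elem = stack.pop(); element_count[elem] = element_count.get(elem, 0) + 1
  let element_count : PySem.Dict Int Int :=
    stack.reverse.foldl (fun d elem => d.insert elem (d.getD elem 0 + 1)) PySem.Dict.empty
  -- for elem in element_count: if element_count[elem] == 1: result.append(elem)
  let result : List Int :=
    element_count.keys.foldl
      (fun result elem => if element_count.getD elem 0 = 1 then result ++ [elem] else result) []
  if result = [] then none else some result

-- ===== PORT B =====
def pop_unique_elements_alt (stack : List Int) : Option (List Int) :=
  -- popped = stack[::-1]  (stack.clear() has no effect on the return value)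
  let popped : List Int := (PySem.List.slice? stack none none (-1)).getD []
  -- one pass maintaining (seen, duplicates)
  let sd : PySem.Set Int × PySem.Set Int :=
    popped.foldl
      (fun sd e =>
        if PySem.Set.contains sd.1 e then (sd.1, PySem.Set.add sd.2 e)
        else (PySem.Set.add sd.1 e, sd.2))
      (PySem.Set.empty, PySem.Set.empty)
  -- result = [e for e in popped if e not in duplicates]
  let result : List Int := popped.filter (fun e => !(PySem.Set.contains sd.2 e))
  if result = [] then none else some result

-- ===== PRECONDITION & SPEC =====
def Spec_pop_unique_elements (stack : List Int) (out : Option (List Int)) : Prop := out = pop_unique_elements_alt stack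
instance (stack : List Int) (out : Option (List Int)) : Decidable (Spec_pop_unique_elements stack out) := by unfold Spec_pop_unique_elements; infer_instance

-- ===== CLAIM (what is proved, stated in full; the proofs are below) =====
def Claim_equal_pop_unique_elements : Prop := ∀ (stack : List Int), Dom_pop_unique_elements stack → Spec_pop_unique_elements stack (pop_unique_elements stack)

-- ===== LEMMAS AND PROOFS =====

-- membership in the seen/duplicates pair after B's single pass
lemma seen_dups_spec (l : List Int) (s d : PySem.Set Int) (y : Int) :
    (y ∈ (l.foldl
        (fun sd e =>
          if PySem.Set.contains sd.1 e then (sd.1, PySem.Set.add sd.2 e)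
          else (PySem.Set.add sd.1 e, sd.2)) (s, d)).1 ↔ y ∈ s ∨ y ∈ l) ∧
    (y ∈ (l.foldl
        (fun sd e =>
          if PySem.Set.contains sd.1 e then (sd.1, PySem.Set.add sd.2 e)
          else (PySem.Set.add sd.1 e, sd.2)) (s, d)).2 ↔
      y ∈ d ∨ (y ∈ s ∧ y ∈ l) ∨ 2 ≤ l.count y) := by
  induction l generalizing s d with
  | nil => simp
  | cons x t ih =>
    simp only [List.foldl_cons]
    by_cases hx : PySem.Set.contains s x = true
    · rw [if_pos hx]
      have hs : x ∈ s := (PySem.Set.contains_iff s x).mp hx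
      have h1 := (ih s (PySem.Set.add d x) ).1
      have h2 := (ih s (PySem.Set.add d x) ).2
      rw [h1, h2]
      by_cases hyx : y = x
      · subst hyx
        simp [PySem.Set.mem_add, hs]
      · have hxy : ¬ x = y := fun h => hyx h.symm
        simp [PySem.Set.mem_add, hyx, hxy]
    · rw [if_neg hx]
      have hs : x ∉ s := fun h => hx ((PySem.Set.contains_iff s x).mpr h)
      have h1 := (ih (PySem.Set.add s x) d).1
      have h2 := (ih (PySem.Set.add s x) d).2
      rw [h1, h2]
      by_cases hyx : y = x
      · subst hyx
        have hc : (y :: t).count y = t.count y + 1 := by simp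
        constructor
        · simp [PySem.Set.mem_add]
        · constructor
          · rintro (h | ⟨hsx, ht⟩ | h)
            · exact Or.inl h
            · rcases (PySem.Set.mem_add s y y).mp hsx with h' | h'
              · exact absurd h' hs
              · refine Or.inr (Or.inr ?_)
                have : 1 ≤ t.count y := List.count_pos_iff.mpr ht
                omega
            · refine Or.inr (Or.inr ?_); omega
          · rintro (h | ⟨hsy, _⟩ | h)
            · exact Or.inl h
            · exact absurd hsy hs
            · refine Or.inr (Or.inl ?_)
              have ht : 1 ≤ t.count y := by omega
              exact ⟨(PySem.Set.mem_add s y y).mpr (Or.inr rfl), List.count_pos_iff.mp ht⟩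
      · have hxy : ¬ x = y := fun h => hyx h.symm
        simp [PySem.Set.mem_add, hyx, hxy]

-- discarding an absent element is the identity
lemma discard_of_not_mem (s : PySem.Set Int) (x : Int) (h : x ∉ s) :
    PySem.Set.discard s x = s := by
  apply List.filter_eq_self.mpr
  intro y hy
  simp only [Bool.not_eq_true', beq_eq_false_iff_ne, ne_eq]
  rintro rfl
  exact h hy

-- filtering by a predicate true only on count-≤-1 elements gives the same list on set(l) and on l
lemma ofList_filter_of_count_le_one (l : List Int) (p : Int → Bool)
    (h : ∀ e ∈ l, p e = true → l.count e ≤ 1) :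
    (PySem.Set.ofList l).filter p = l.filter p := by
  induction l with
  | nil => simp [PySem.Set.ofList_nil]
  | cons x t ih =>
    have ht : ∀ e ∈ t, p e = true → t.count e ≤ 1 := by
      intro e he hp
      have := h e (List.mem_cons_of_mem x he) hp
      simp only [List.count_cons] at this
      omega
    rw [PySem.Set.ofList_cons]
    by_cases hp : p x = true
    · have hx : t.count x = 0 := by
        have := h x List.mem_cons_self hp
        rw [List.count_cons_self] at this
        omega
      have hxt : x ∉ t := by
        intro hm
        have := List.count_pos_iff.mpr hm
        omega
      have hxo : x ∉ PySem.Set.ofList t := fun hm => hxt ((PySem.Set.mem_ofList t x).mp hm)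
      rw [discard_of_not_mem _ _ hxo]
      simp only [List.filter_cons, hp, if_pos]
      rw [ih ht]
    · have hp' : p x = false := by simpa using hp
      rw [List.filter_cons_of_neg hp, List.filter_cons_of_neg hp]
      have hd : (PySem.Set.discard (PySem.Set.ofList t) x).filter p
          = (PySem.Set.ofList t).filter p := by
        unfold PySem.Set.discard
        rw [List.filter_filter]
        apply List.filter_congr
        intro a _
        by_cases hax : a = x
        · subst hax; simp [hp']
        · simp [hax]
      rw [hd, ih ht]

-- both results are the count-1 filter of the reversed stack
lemma results_eq (stack : List Int) :
    (PySem.Dict.counter stack.reverse).keys.foldl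
      (fun result elem =>
        if (PySem.Dict.counter stack.reverse).getD elem 0 = 1 then result ++ [elem] else result) []
    = stack.reverse.filter
        (fun e => !(PySem.Set.contains
          (stack.reverse.foldl
            (fun sd e =>
              if PySem.Set.contains sd.1 e then (sd.1, PySem.Set.add sd.2 e)
              else (PySem.Set.add sd.1 e, sd.2))
            (PySem.Set.empty, PySem.Set.empty)).2 e)) := by
  set r := stack.reverse with hr
  rw [PySem.List.foldl_append_ite_eq_filter
    (p := fun elem => (PySem.Dict.counter r).getD elem 0 = 1)]
  rw [List.nil_append, PySem.Dict.keys_counter]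
  have hA : (PySem.Set.ofList r).filter
      (fun x => decide ((PySem.Dict.counter r).getD x 0 = 1))
      = (PySem.Set.ofList r).filter (fun x => decide ((r.count x : Int) = 1)) := by
    apply List.filter_congr
    intro a _
    rw [PySem.Dict.getD_counter]
  rw [hA]
  rw [ofList_filter_of_count_le_one r _ (by
    intro e _ hp
    have : (r.count e : Int) = 1 := of_decide_eq_true hp
    omega)]
  symm
  apply List.filter_congr
  intro e he
  have hd := (seen_dups_spec r PySem.Set.empty PySem.Set.empty e).2
  simp only [PySem.Set.empty, List.not_mem_nil, false_and, false_or] at hd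
  have hpos : 1 ≤ r.count e := List.count_pos_iff.mpr he
  by_cases hc : e ∈ (r.foldl
      (fun sd e =>
        if PySem.Set.contains sd.1 e then (sd.1, PySem.Set.add sd.2 e)
        else (PySem.Set.add sd.1 e, sd.2))
      (PySem.Set.empty, PySem.Set.empty)).2
  · have h2 : 2 ≤ r.count e := hd.mp hc
    have hct : PySem.Set.contains _ e = true := (PySem.Set.contains_iff _ e).mpr hc
    rw [hct]
    simp only [Bool.not_true]
    symm
    simp only [decide_eq_false_iff_not]
    omega
  · have hcf : PySem.Set.contains (r.foldl
        (fun sd e =>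
          if PySem.Set.contains sd.1 e then (sd.1, PySem.Set.add sd.2 e)
          else (PySem.Set.add sd.1 e, sd.2))
        (PySem.Set.empty, PySem.Set.empty)).2 e = false := by
      rw [← Bool.not_eq_true]
      exact fun h => hc ((PySem.Set.contains_iff _ e).mp h)
    have h2 : ¬ 2 ≤ r.count e := fun h => hc (hd.mpr h)
    rw [hcf]
    simp only [Bool.not_false]
    symm
    simp only [decide_eq_true_eq]
    omega

-- ===== VERDICT (by name: the statement is the Claim_ definition above) =====
theorem pop_unique_elements_spec : Claim_equal_pop_unique_elements := by
  intro stack _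
  show pop_unique_elements stack = pop_unique_elements_alt stack
  simp only [pop_unique_elements, pop_unique_elements_alt,
    PySem.List.slice?_none_none_neg_one, Option.getD_some,
    PySem.Dict.foldl_insert_getD_add_one_eq_counter]
  exact congrArg (fun r : List Int => if r = [] then none else some r) (results_eq stack)
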